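-- pv_equiv track=rewrite | github.com/NatalyHofkamp/Practicas-clases | practica_preparcial.py | lenguaje
-- ===== SOURCE A (Python) =====
-- def lenguaje(lista):
--     x=0
--     for i in lista:
--         if i=='++x' or i=='x++':
--             x+=1
--         elif i=='--x' or i=='x--':
--             x-=1
--     return x
-- ===== SOURCE B (Python) =====
-- def lenguaje(lista):
--     return (lista.count('++x') + lista.count('x++')
--             - lista.count('--x') - lista.count('x--'))
-- ===== Notes on version B (the rewrite author's own statement) =====
-- stated objective: idiomatic
-- what changed: Replaces the per-element branching accumulator loop by four list.count passes combined arithmetically (count('++x')+count('x++')-count('--x')-count('x--')).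
import Mathlib
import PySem

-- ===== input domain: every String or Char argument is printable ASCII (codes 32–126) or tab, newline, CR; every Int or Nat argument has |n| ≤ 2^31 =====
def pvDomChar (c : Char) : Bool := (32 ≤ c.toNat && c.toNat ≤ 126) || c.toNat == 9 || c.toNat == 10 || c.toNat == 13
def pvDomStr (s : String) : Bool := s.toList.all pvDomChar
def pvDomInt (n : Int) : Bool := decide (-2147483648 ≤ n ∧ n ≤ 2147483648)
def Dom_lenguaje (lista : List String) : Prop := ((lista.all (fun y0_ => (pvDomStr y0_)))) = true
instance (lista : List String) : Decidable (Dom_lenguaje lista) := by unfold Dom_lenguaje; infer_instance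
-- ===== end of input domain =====

-- B replaces A's per-element branching accumulator loop by four list.count passes combined arithmetically (idiomatic).

-- ===== PORT A =====
def lenguaje (lista : List String) : Int :=
  lista.foldl (fun x i =>
    if i == "++x" || i == "x++" then x + 1
    else if i == "--x" || i == "x--" then x - 1
    else x) 0

-- ===== PORT B =====
def lenguaje_alt (lista : List String) : Int :=
  (PySem.List.count lista "++x" : Int) + (PySem.List.count lista "x++" : Int)
    - (PySem.List.count lista "--x" : Int) - (PySem.List.count lista "x--" : Int)

-- ===== PRECONDITION & SPEC =====
def Spec_lenguaje (lista : List String) (out : Int) : Prop := out = lenguaje_alt lista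
instance (lista : List String) (out : Int) : Decidable (Spec_lenguaje lista out) := by unfold Spec_lenguaje; infer_instance

-- ===== CLAIM (what is proved, stated in full; the proofs are below) =====
def Claim_equal_lenguaje : Prop := ∀ (lista : List String), Dom_lenguaje lista → Spec_lenguaje lista (lenguaje lista)

-- ===== LEMMAS AND PROOFS =====
theorem lenguaje_foldl_counts (lista : List String) (a : Int) :
    lista.foldl (fun x i =>
      if i == "++x" || i == "x++" then x + 1
      else if i == "--x" || i == "x--" then x - 1
      else x) a
    = a + (lista.count "++x" : Int) + (lista.count "x++" : Int)
        - (lista.count "--x" : Int) - (lista.count "x--" : Int) := by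
  induction lista generalizing a with
  | nil => simp
  | cons h t ih =>
    simp only [List.foldl_cons, ih, List.count_cons]
    by_cases h1 : h = "++x" <;> by_cases h2 : h = "x++" <;>
      by_cases h3 : h = "--x" <;> by_cases h4 : h = "x--" <;>
      simp_all <;> ring

-- ===== VERDICT (by name: the statement is the Claim_ definition above) =====
theorem lenguaje_spec : Claim_equal_lenguaje := by
  intro lista _
  show lenguaje lista = lenguaje_alt lista
  simp only [lenguaje, lenguaje_alt, PySem.List.count_eq, lenguaje_foldl_counts, zero_add]
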